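-- pv_equiv track=rewrite | github.com/trgill/snapm | snapm/manager/plugins/_plugin.py | _unescape_bad_chars
-- ===== SOURCE A (Python) =====
-- def _unescape_bad_chars(path):
--     """
--     Decode illegal characters in mount point path.
--
--     :param path: The path to unescape.
--     :returns: The unescaped path.
--     """
--
--     def decode_byte(byte):
--         return bytearray.fromhex(byte).decode("utf8")
--
--     unescaped = ""
--     i = 0
--     while i < len(path):
--         if path[i] == ".":
--             if path[i + 1] == ".":
--                 unescaped = unescaped + "."
--                 i += 1
--             else:
--                 unescaped = unescaped + decode_byte(path[i + 1 : i + 3])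
--                 i += 2
--         else:
--             unescaped = unescaped + path[i]
--         i += 1
--     return unescaped
-- ===== SOURCE B (Python) =====
-- def _unescape_bad_chars(path):
--     """
--     Decode illegal characters in mount point path.
--
--     :param path: The path to unescape.
--     :returns: The unescaped path.
--     """
--     out = []
--     i = 0
--     while True:
--         j = path.find(".", i)
--         if j == -1:
--             out.append(path[i:])
--             break
--         out.append(path[i:j])
--         nxt = path[j + 1]
--         if nxt == ".":
--             out.append(".")
--             i = j + 2
--         else:
--             out.append(bytearray.fromhex(path[j + 1 : j + 3]).decode("utf8"))
--             i = j + 3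
--     return "".join(out)
-- ===== Notes on version B (the rewrite author's own statement) =====
-- stated objective: faster
-- what changed: Replaces A's char-by-char while loop (one-character string concatenations, quadratic) with a find-based chunked scan: str.find locates the next '.', each dot-free run is appended as one slice, and the pieces are joined once at the end.
-- outside the precondition, e.g. on _unescape_bad_chars('.'): A raises IndexError, B raises IndexError
import Mathlib
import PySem

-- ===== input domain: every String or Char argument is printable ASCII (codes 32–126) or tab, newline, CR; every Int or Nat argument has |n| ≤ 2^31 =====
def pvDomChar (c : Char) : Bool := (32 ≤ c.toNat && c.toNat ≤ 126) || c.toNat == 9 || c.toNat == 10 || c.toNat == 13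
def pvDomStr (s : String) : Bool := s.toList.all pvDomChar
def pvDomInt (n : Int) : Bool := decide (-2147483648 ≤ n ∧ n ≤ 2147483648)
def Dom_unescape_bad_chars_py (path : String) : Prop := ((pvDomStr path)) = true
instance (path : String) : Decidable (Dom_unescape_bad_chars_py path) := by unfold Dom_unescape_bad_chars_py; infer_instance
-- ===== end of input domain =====

-- B replaces A's char-by-char while loop with quadratic string concatenation by a find-based
-- chunked scan (str.find + whole-slice appends, joined once); measured faster at large sizes.
-- On inputs where the Python raises, both Pythons raise alike and both ports return "";
-- Pre_ excludes exactly those inputs.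

-- shared helper: bytearray.fromhex(s).decode("utf8") for a slice s of length ≤ 2
-- drawn from a Dom-string (exact there: fromhex skips ASCII whitespace, demands an even
-- number of hex digits, and utf-8 decoding of one byte succeeds exactly for bytes ≤ 0x7f)
def pvIsWs (c : Char) : Bool := c = ' ' || c = '\t' || c = '\n' || c = '\r'

def pvIsHex (c : Char) : Bool :=
  ('0' ≤ c && c ≤ '9') || ('a' ≤ c && c ≤ 'f') || ('A' ≤ c && c ≤ 'F')

def pvHexVal (c : Char) : Nat :=
  if c ≤ '9' then c.toNat - 48 else if c ≤ 'F' then c.toNat - 55 else c.toNat - 87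

def pvFromhexDecode : List Char → Option (List Char)
  | [] => some []
  | [c] => if pvIsWs c then some [] else none
  | [c₁, c₂] =>
    if pvIsWs c₁ && pvIsWs c₂ then some []
    else if pvIsHex c₁ && pvIsHex c₂ then
      let v := pvHexVal c₁ * 16 + pvHexVal c₂
      if v ≤ 127 then some [Char.ofNat v] else none
    else none
  | _ => none

-- ===== PORT A =====
-- A: while loop over single characters; none = the Python raises there
def unescA : List Char → Option (List Char)
  | [] => some []
  | c :: rest =>
    if c = '.' then
      match rest with
      | [] => none
      | c₂ :: rest₂ =>
        if c₂ = '.' then (unescA rest₂).map (fun t => '.' :: t)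
        else
          -- path[i+1 : i+3] spelled out: one or two characters remain
          match rest₂ with
          | [] => (pvFromhexDecode [c₂]).bind
                    (fun d => (unescA ([] : List Char)).map (fun t => d ++ t))
          | c₃ :: rest₃ => (pvFromhexDecode [c₂, c₃]).bind
                    (fun d => (unescA rest₃).map (fun t => d ++ t))
    else (unescA rest).map (fun t => c :: t)

def unescape_bad_chars_py (path : String) : String :=
  ((unescA path.toList).getD [])  |> String.ofList

-- ===== PORT B =====
-- B: j = path.find('.', i); copy path[i:j] as one chunk, handle the escape, continue
def unescB (fuel : Nat) (l : List Char) (i : Nat) : Option (List Char) :=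
  match fuel with
  | 0 => none  -- fuel guard only: never reached for fuel > l.length + 2 - i
  | fuel + 1 =>
    if PySem.Chars.findFrom l ['.'] (i : Int) none = -1 then
      some (PySem.List.slice l (some (i : Int)) none)
    else
      match PySem.List.pyGet? l (PySem.Chars.findFrom l ['.'] (i : Int) none + 1) with
      | none => none
      | some c =>
        if c = '.' then
          (unescB fuel l (PySem.Chars.findFrom l ['.'] (i : Int) none + 2).toNat).map
            (fun t => PySem.List.slice l (some (i : Int)) (some (PySem.Chars.findFrom l ['.'] (i : Int) none)) ++ '.' :: t)
        else
          (pvFromhexDecode (PySem.List.slice l (some (PySem.Chars.findFrom l ['.'] (i : Int) none + 1)) (some (PySem.Chars.findFrom l ['.'] (i : Int) none + 3)))).bind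
            (fun d => (unescB fuel l (PySem.Chars.findFrom l ['.'] (i : Int) none + 3).toNat).map
              (fun t => PySem.List.slice l (some (i : Int)) (some (PySem.Chars.findFrom l ['.'] (i : Int) none)) ++ d ++ t))

def unescape_bad_chars_py_alt (path : String) : String :=
  ((unescB (path.toList.length + 3) path.toList 0).getD [])  |> String.ofList

-- ===== PRECONDITION & SPEC =====
-- Pre_: the well-escaped-path grammar — exactly the inputs on which the Python A returns
-- (a '.' must be followed by '.', by a hex pair decoding to a byte ≤ 0x7f, by two
-- whitespace chars (fromhex skips them), or — at the very end — by one whitespace char;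
-- anything else raises an Index/Value/UnicodeDecodeError).
def pvWellEscaped : List Char → Bool
  | [] => true
  | c :: rest =>
    if c = '.' then
      match rest with
      | [] => false
      | c₁ :: rest₁ =>
        if c₁ = '.' then pvWellEscaped rest₁
        else
          match rest₁ with
          | [] => pvIsWs c₁
          | c₂ :: rest₂ => (pvFromhexDecode [c₁, c₂]).isSome && pvWellEscaped rest₂
    else pvWellEscaped rest

def Pre_unescape_bad_chars_py (path : String) : Prop := pvWellEscaped path.toList = true
instance (path : String) : Decidable (Pre_unescape_bad_chars_py path) := by unfold Pre_unescape_bad_chars_py; infer_instance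

def pvWitness_unescape_bad_chars_py : String := "a..b"

def Spec_unescape_bad_chars_py (path : String) (out : String) : Prop := out = unescape_bad_chars_py_alt path
instance (path : String) (out : String) : Decidable (Spec_unescape_bad_chars_py path out) := by unfold Spec_unescape_bad_chars_py; infer_instance

-- ===== CLAIM (what is proved, stated in full; the proofs are below) =====
def Claim_equal_unescape_bad_chars_py : Prop := ∀ (path : String), Dom_unescape_bad_chars_py path → Pre_unescape_bad_chars_py path → Spec_unescape_bad_chars_py path (unescape_bad_chars_py path)

-- ===== LEMMAS AND PROOFS =====

-- bounds of str.find's result (used throughout the equivalence proof)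
theorem findFrom_dot_bounds (l : List Char) (i : Nat)
    (h : ¬ PySem.Chars.findFrom l ['.'] (i : Int) none = -1) :
    0 ≤ PySem.Chars.findFrom l ['.'] (i : Int) none ∧
    i ≤ (PySem.Chars.findFrom l ['.'] (i : Int) none).toNat ∧
    (PySem.Chars.findFrom l ['.'] (i : Int) none).toNat < l.length := by
  by_cases hi : i ≤ l.length
  · obtain ⟨h1, h2, _⟩ := PySem.Chars.findFrom_natCast_spec l ['.'] i hi h
    have hlen := h2.length_le
    simp at hlen
    exact ⟨by omega, by omega, by omega⟩
  · exact absurd (by simp [PySem.Chars.findFrom]; omega) h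

-- A skips a dot-free prefix verbatim
theorem unescA_append (xs rest : List Char) (hx : '.' ∉ xs) :
    unescA (xs ++ rest) = (unescA rest).map (fun t => xs ++ t) := by
  induction xs with
  | nil => cases h : unescA rest <;> simp [h]
  | cons c xs ih =>
    have hc : ¬ c = '.' := fun h => hx (by simp [h])
    rw [List.cons_append, unescA.eq_def]
    simp only [hc, if_false]
    rw [ih (fun h => hx (List.mem_cons_of_mem _ h))]
    cases h : unescA rest <;> simp

theorem unescA_nil : unescA [] = some [] := by rw [unescA.eq_def]

theorem unescA_dot_nil : unescA ['.'] = none := by rw [unescA.eq_def]; rfl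

theorem unescA_dotdot (r : List Char) :
    unescA ('.' :: '.' :: r) = (unescA r).map (fun t => '.' :: t) := by
  rw [unescA.eq_def]; simp

theorem unescA_dot_cons (c : Char) (r : List Char) (hc : ¬ c = '.') :
    unescA ('.' :: c :: r) = (pvFromhexDecode ((c :: r).take 2)).bind
      (fun d => (unescA ((c :: r).drop 2)).map (fun t => d ++ t)) := by
  rw [unescA.eq_def]; cases r <;> simp [hc]

theorem unescB_eq_unescA_aux (n : Nat) : ∀ (l : List Char) (i : Nat),
    l.length + 2 - i < n → unescB n l i = unescA (l.drop i) := by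
  induction n with
  | zero => intro l i hn; omega
  | succ n ih =>
    intro l i hn
    rw [unescB]
    by_cases hj : PySem.Chars.findFrom l ['.'] (i : Int) none = -1
    · rw [if_pos hj, PySem.List.slice_from_natCast]
      by_cases hi : i ≤ l.length
      · have hnd : '.' ∉ l.drop i := by
          have := (PySem.Chars.findFrom_natCast_eq_neg_one_iff l ['.'] i hi).mp hj
          exact fun hm => this ((List.singleton_infix_iff _ _).mpr hm)
        rw [show l.drop i = l.drop i ++ [] by simp, unescA_append _ _ hnd, unescA_nil]
        simp
      · rw [List.drop_eq_nil_of_le (by omega), unescA_nil]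
    · rw [if_neg hj]
      obtain ⟨hj0, hik, hklen⟩ := findFrom_dot_bounds l i hj
      obtain ⟨-, hpre, hmin⟩ := PySem.Chars.findFrom_natCast_spec l ['.'] i (by omega) hj
      have hjk : PySem.Chars.findFrom l ['.'] (i : Int) none =
          (((PySem.Chars.findFrom l ['.'] (i : Int) none).toNat : Nat) : Int) := by omega
      rw [hjk]
      generalize hk : (PySem.Chars.findFrom l ['.'] (i : Int) none).toNat = k at *
      clear hjk hj hj0
      have hgetk : l[k] = '.' := by
        obtain ⟨t, ht⟩ := hpre
        rw [List.drop_eq_getElem_cons hklen] at ht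
        simp only [List.singleton_append, List.cons.injEq] at ht
        exact ht.1.symm
      have hdropk : l.drop k = '.' :: l.drop (k + 1) := by
        rw [List.drop_eq_getElem_cons hklen, hgetk]
      have hxs : '.' ∉ (l.drop i).take (k - i) := by
        intro hm
        obtain ⟨m, hmlt, hget⟩ := List.getElem_of_mem hm
        have hmlt2 : m < k - i := lt_of_lt_of_le hmlt (by simp)
        have hml : i + m < l.length := by omega
        refine hmin (i + m) (by omega) (by omega) ⟨l.drop (i + m + 1), ?_⟩
        rw [List.drop_eq_getElem_cons hml]
        simp only [List.singleton_append, List.cons.injEq, and_true]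
        rw [← hget]
        simp [List.getElem_take, List.getElem_drop]
      have hsplit : l.drop i = (l.drop i).take (k - i) ++ '.' :: l.drop (k + 1) := by
        conv_lhs => rw [← List.take_append_drop (k - i) (l.drop i)]
        rw [List.drop_drop, Nat.add_sub_cancel' hik, hdropk]
      rw [PySem.List.slice_natCast]
      by_cases hlast : k + 1 < l.length
      · have hget1 : PySem.List.pyGet? l ((k : Int) + 1) = some l[k + 1] := by
          rw [show ((k : Int) + 1) = ((k + 1 : Nat) : Int) by push_cast; ring,
              PySem.List.pyGet?_natCast, List.getElem?_eq_getElem hlast]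
        simp only [hget1]
        have hdropk1 : l.drop (k + 1) = l[k + 1] :: l.drop (k + 2) := List.drop_eq_getElem_cons hlast
        by_cases hc : l[k + 1] = '.'
        · rw [if_pos hc]
          rw [show ((k : Int) + 2).toNat = k + 2 by omega, ih l (k + 2) (by omega)]
          rw [hsplit, unescA_append _ _ hxs, hdropk1, hc, unescA_dotdot]
          have hxlen : ((l.drop i).take (k - i)).length = k - i := by simp; omega
          cases unescA (l.drop (k + 2)) <;>
            simp [List.take_append_of_le_length (le_of_eq hxlen.symm), List.take_take]
        · rw [if_neg hc]
          rw [show ((k : Int) + 3).toNat = k + 3 by omega, ih l (k + 3) (by omega)]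
          rw [show ((k : Int) + 1) = ((k + 1 : Nat) : Int) by push_cast; ring,
              show ((k : Int) + 3) = ((k + 3 : Nat) : Int) by push_cast; ring,
              PySem.List.slice_natCast,
              show k + 3 - (k + 1) = 2 by omega]
          rw [hsplit, unescA_append _ _ hxs, hdropk1, unescA_dot_cons _ _ hc, ← hdropk1]
          have hdrop2 : ((l.drop (k + 1)).drop 2) = l.drop (k + 3) := by
            rw [List.drop_drop]
          rw [hdrop2]
          have hxlen : ((l.drop i).take (k - i)).length = k - i := by simp; omega
          cases pvFromhexDecode ((l.drop (k + 1)).take 2) <;>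
            cases unescA (l.drop (k + 3)) <;>
              simp [List.take_append_of_le_length (le_of_eq hxlen.symm), List.take_take]
      · have hget1 : PySem.List.pyGet? l ((k : Int) + 1) = none := by
          rw [show ((k : Int) + 1) = ((k + 1 : Nat) : Int) by push_cast; ring,
              PySem.List.pyGet?_natCast, List.getElem?_eq_none (by omega)]
        rw [hget1, hsplit, unescA_append _ _ hxs,
            List.drop_eq_nil_of_le (le_of_not_gt hlast), unescA_dot_nil]
        simp

-- the two ports agree (on every input, raising or not)
theorem unescB_eq_unescA (l : List Char) :
    unescB (l.length + 3) l 0 = unescA l := by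
  have := unescB_eq_unescA_aux (l.length + 3) l 0 (by omega)
  rwa [List.drop_zero] at this

-- ===== VERDICT (by name: the statement is the Claim_ definition above) =====
theorem unescape_bad_chars_py_spec : Claim_equal_unescape_bad_chars_py := by
  intro path _ _
  unfold Spec_unescape_bad_chars_py unescape_bad_chars_py unescape_bad_chars_py_alt
  rw [unescB_eq_unescA]
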